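-- pv_equiv track=rewrite | github.com/mazamizo21/NeuroSploit-SaaS-v2 | skills/wireless/scripts/airodump_csv_to_json.py | summarize_access_points
-- ===== SOURCE A (Python) =====
-- from typing import Dict, List, Tuple
--
-- def summarize_access_points(access_points: List[Dict[str, str]]) -> Dict[str, int]:
--     summary = {
--         "total": 0,
--         "open": 0,
--         "wep": 0,
--         "wpa2": 0,
--         "wpa3": 0,
--         "wps": 0,
--     }
--     for ap in access_points:
--         summary["total"] += 1
--         privacy = (ap.get("privacy") or "").upper()
--         if "OPN" in privacy or "OPEN" in privacy:
--             summary["open"] += 1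
--         if "WEP" in privacy:
--             summary["wep"] += 1
--         if "WPA3" in privacy:
--             summary["wpa3"] += 1
--         elif "WPA2" in privacy or "WPA" in privacy:
--             summary["wpa2"] += 1
--         if "WPS" in privacy:
--             summary["wps"] += 1
--     return summary
-- ===== SOURCE B (Python) =====
-- def summarize_access_points(access_points):
--     privs = [(ap.get("privacy") or "").upper() for ap in access_points]
--     return {
--         "total": len(privs),
--         "open": sum(1 for p in privs if "OPN" in p or "OPEN" in p),
--         "wep": sum(1 for p in privs if "WEP" in p),
--         "wpa2": sum(1 for p in privs if ("WPA2" in p or "WPA" in p) and "WPA3" not in p),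
--         "wpa3": sum(1 for p in privs if "WPA3" in p),
--         "wps": sum(1 for p in privs if "WPS" in p),
--     }
-- ===== Notes on version B (the rewrite author's own statement) =====
-- stated objective: simpler
-- what changed: Replaces the single accumulating loop that mutates a counter dict with one normalization pass followed by an independent count (filter length) per category, with the WPA2-vs-WPA3 elif expressed as an explicit 'and WPA3 not in p' condition.
import Mathlib
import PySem

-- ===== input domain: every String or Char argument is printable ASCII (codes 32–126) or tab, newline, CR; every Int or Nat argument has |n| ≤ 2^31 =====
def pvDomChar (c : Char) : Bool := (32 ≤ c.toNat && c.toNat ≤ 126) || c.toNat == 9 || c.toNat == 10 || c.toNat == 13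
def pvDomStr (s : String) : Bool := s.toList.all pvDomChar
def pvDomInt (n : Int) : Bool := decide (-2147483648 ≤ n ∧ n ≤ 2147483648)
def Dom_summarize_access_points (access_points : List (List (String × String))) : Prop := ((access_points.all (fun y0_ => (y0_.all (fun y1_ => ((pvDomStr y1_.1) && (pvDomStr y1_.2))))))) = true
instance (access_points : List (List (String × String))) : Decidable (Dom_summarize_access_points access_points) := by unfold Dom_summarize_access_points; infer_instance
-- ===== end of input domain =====

-- B replaces A's single accumulating loop over a mutable counter dict by one
-- normalization pass plus an independent count per category (objective: simpler).

-- (ap.get("privacy") or "").upper() — shared normalization both Pythons contain verbatim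
def pvPriv (ap : List (String × String)) : String :=
  PySem.Str.upper ((PySem.Dict.mk ap).getD "privacy" "")

-- ===== PORT A =====
-- one iteration of A's for-loop body over the summary dict
def pvStep (d : PySem.Dict String Int) (ap : List (String × String)) : PySem.Dict String Int :=
  let d := d.modify "total" 0 (· + 1)
  let privacy := pvPriv ap
  let d := if PySem.Str.isIn "OPN" privacy || PySem.Str.isIn "OPEN" privacy then d.modify "open" 0 (· + 1) else d
  let d := if PySem.Str.isIn "WEP" privacy then d.modify "wep" 0 (· + 1) else d
  let d := if PySem.Str.isIn "WPA3" privacy then d.modify "wpa3" 0 (· + 1)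
           else if PySem.Str.isIn "WPA2" privacy || PySem.Str.isIn "WPA" privacy then d.modify "wpa2" 0 (· + 1) else d
  let d := if PySem.Str.isIn "WPS" privacy then d.modify "wps" 0 (· + 1) else d
  d

def summarize_access_points (access_points : List (List (String × String))) : List (String × Int) :=
  let summary : PySem.Dict String Int :=
    PySem.Dict.mk [("total", 0), ("open", 0), ("wep", 0), ("wpa2", 0), ("wpa3", 0), ("wps", 0)]
  (access_points.foldl pvStep summary).items

-- ===== PORT B =====
def summarize_access_points_alt (access_points : List (List (String × String))) : List (String × Int) :=
  let privs := access_points.map pvPriv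
  [("total", (privs.length : Int)),
   ("open", (privs.countP (fun p => PySem.Str.isIn "OPN" p || PySem.Str.isIn "OPEN" p) : Int)),
   ("wep", (privs.countP (fun p => PySem.Str.isIn "WEP" p) : Int)),
   ("wpa2", (privs.countP (fun p => (PySem.Str.isIn "WPA2" p || PySem.Str.isIn "WPA" p) && !PySem.Str.isIn "WPA3" p) : Int)),
   ("wpa3", (privs.countP (fun p => PySem.Str.isIn "WPA3" p) : Int)),
   ("wps", (privs.countP (fun p => PySem.Str.isIn "WPS" p) : Int))]

-- ===== PRECONDITION & SPEC =====
def Spec_summarize_access_points (access_points : List (List (String × String))) (out : List (String × Int)) : Prop := out = summarize_access_points_alt access_points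
instance (access_points : List (List (String × String))) (out : List (String × Int)) : Decidable (Spec_summarize_access_points access_points out) := by unfold Spec_summarize_access_points; infer_instance

-- ===== CLAIM (what is proved, stated in full; the proofs are below) =====
def Claim_equal_summarize_access_points : Prop := ∀ (access_points : List (List (String × String))), Dom_summarize_access_points access_points → Spec_summarize_access_points access_points (summarize_access_points access_points)

-- ===== LEMMAS AND PROOFS =====

-- one loop iteration on the always-six-key summary dict, as a dict literal
theorem pvStep_mk (t o we w2 w3 wp : Int) (ap : List (String × String)) :
    pvStep (PySem.Dict.mk [("total",t),("open",o),("wep",we),("wpa2",w2),("wpa3",w3),("wps",wp)]) ap =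
    PySem.Dict.mk [("total", t + 1),
      ("open", o + (if PySem.Str.isIn "OPN" (pvPriv ap) || PySem.Str.isIn "OPEN" (pvPriv ap) then 1 else 0)),
      ("wep", we + (if PySem.Str.isIn "WEP" (pvPriv ap) then 1 else 0)),
      ("wpa2", w2 + (if (PySem.Str.isIn "WPA2" (pvPriv ap) || PySem.Str.isIn "WPA" (pvPriv ap)) && !PySem.Str.isIn "WPA3" (pvPriv ap) then 1 else 0)),
      ("wpa3", w3 + (if PySem.Str.isIn "WPA3" (pvPriv ap) then 1 else 0)),
      ("wps", wp + (if PySem.Str.isIn "WPS" (pvPriv ap) then 1 else 0))] := by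
  simp only [pvStep]
  split_ifs <;> simp_all [PySem.Dict.modify, PySem.Dict.insert, PySem.Dict.getD, PySem.Dict.get?, PySem.Dict.contains]

-- loop invariant: the fold adds per-category counts to the starting counters
theorem pvLoop (aps : List (List (String × String))) (t o we w2 w3 wp : Int) :
    (aps.foldl pvStep (PySem.Dict.mk [("total",t),("open",o),("wep",we),("wpa2",w2),("wpa3",w3),("wps",wp)])).items =
    [("total", t + aps.length),
     ("open", o + ((aps.map pvPriv).countP (fun p => PySem.Str.isIn "OPN" p || PySem.Str.isIn "OPEN" p) : Int)),
     ("wep", we + ((aps.map pvPriv).countP (fun p => PySem.Str.isIn "WEP" p) : Int)),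
     ("wpa2", w2 + ((aps.map pvPriv).countP (fun p => (PySem.Str.isIn "WPA2" p || PySem.Str.isIn "WPA" p) && !PySem.Str.isIn "WPA3" p) : Int)),
     ("wpa3", w3 + ((aps.map pvPriv).countP (fun p => PySem.Str.isIn "WPA3" p) : Int)),
     ("wps", wp + ((aps.map pvPriv).countP (fun p => PySem.Str.isIn "WPS" p) : Int))] := by
  induction aps generalizing t o we w2 w3 wp with
  | nil => simp
  | cons ap rest ih =>
    rw [List.foldl_cons, pvStep_mk, ih]
    simp only [List.map_cons, List.countP_cons, List.length_cons, List.cons.injEq, Prod.mk.injEq]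
    and_intros <;> first
      | rfl
      | trivial
      | (push_cast; ring)

-- ===== VERDICT (by name: the statement is the Claim_ definition above) =====
theorem summarize_access_points_spec : Claim_equal_summarize_access_points := by
  intro aps _
  unfold Spec_summarize_access_points summarize_access_points summarize_access_points_alt
  rw [pvLoop]
  simp
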